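-- pv_equiv track=rewrite | github.com/rsanchezmo/advent-of-code-2025 | day06/solution.py | parse_input_part2
-- ===== SOURCE A (Python) =====
-- def parse_input_part2(raw_input: str):
--     lines = raw_input.strip().splitlines()
--
--     # find operand positions in the last line
--     operand_cols = [(idx, char) for idx, char in enumerate(lines[-1]) if char in "+*"]
--     operands = [op for _, op in operand_cols]
--
--     # find column size and then extract numbers vertically
--     numbers = []
--     for i in range(len(operand_cols)):
--         group_nums = []
--         start_idx = operand_cols[i][0]
--         end_idx = operand_cols[i + 1][0] if i + 1 < len(operand_cols) else len(lines[0])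
--         group_nums = []
--         for col in range(start_idx, end_idx):
--             col_num = ''.join(line[col] for line in lines[:-1]).strip()
--             if col_num:
--                 group_nums.append(int(col_num))
--         numbers.append(group_nums)
--     return numbers, operands
-- ===== SOURCE B (Python) =====
-- def parse_input_part2(raw_input: str):
--     # one flat left-to-right column scan with a current-group accumulator:
--     # no operator-position list, no per-group inner range loop
--     lines = raw_input.strip().splitlines()
--     last = lines[-1]
--     body = lines[:-1]
--     width = len(lines[0])
--     numbers = []
--     operands = []
--     group = None
--     for col in range(max(len(last), width)):
--         if col < len(last) and last[col] in "+*":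
--             if group is not None:
--                 numbers.append(group)
--             group = []
--             operands.append(last[col])
--         if group is not None and col < width:
--             s = ''.join(line[col] for line in body).strip()
--             if s:
--                 group.append(int(s))
--     if group is not None:
--         numbers.append(group)
--     return numbers, operands
-- ===== Notes on version B (the rewrite author's own statement) =====
-- stated objective: alternative
-- what changed: Replaces A's two-stage scheme (materialise the operator-position list, then an indexed pass with an i+1 lookahead and an inner per-group column loop) by one flat left-to-right scan over all columns that carries a current-group accumulator: an operator flushes the group and opens a new one, every later column appends its vertical number to the open group.
import Mathlib
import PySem

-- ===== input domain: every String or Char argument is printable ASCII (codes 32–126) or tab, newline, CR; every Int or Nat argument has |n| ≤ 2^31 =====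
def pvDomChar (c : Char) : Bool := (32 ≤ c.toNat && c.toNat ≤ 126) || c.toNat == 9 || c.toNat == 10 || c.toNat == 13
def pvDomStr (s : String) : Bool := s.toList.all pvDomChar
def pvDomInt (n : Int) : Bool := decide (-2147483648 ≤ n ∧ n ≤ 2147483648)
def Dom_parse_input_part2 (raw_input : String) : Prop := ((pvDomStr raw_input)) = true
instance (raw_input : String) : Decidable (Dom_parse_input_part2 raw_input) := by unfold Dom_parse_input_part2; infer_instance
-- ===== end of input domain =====

-- B replaces A's two-stage scheme (materialised operator-position list, indexed pass with an
-- i+1 lookahead and an inner per-group column loop) by one flat left-to-right scan over all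
-- columns carrying a current-group accumulator; objective: alternative decomposition.

-- shared helpers (the same inline code appears in both Pythons):
def pvIsOp (c : Char) : Bool := c == '+' || c == '*'

-- ''.join(line[col] for line in lines[:-1]).strip() ; pyGetD is exact when col is in range
-- for every body line (guaranteed by Pre_; Python raises IndexError otherwise)
def pvColNum (body : List (List Char)) (col : Int) : List Char :=
  PySem.Chars.strip (body.map (fun line => PySem.List.pyGetD line col ' '))

def pvLines (raw_input : String) : List (List Char) :=
  (PySem.Str.splitlines (PySem.Str.strip raw_input)).map String.toList

-- ===== PORT A =====
-- A's inner 'for col in range(a, b): … if col_num: group_nums.append(int(col_num))' loop;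
-- int() is exact under Pre_ (ValueError excluded)
def pvHarvest (body : List (List Char)) (a b : Int) : List Int :=
  (PySem.List.pyRange a b 1).foldl (fun acc col =>
    let s := pvColNum body col
    if s.isEmpty then acc else acc ++ [(PySem.Int.ofChars? s).getD 0]) []

def parse_input_part2 (raw_input : String) : List (List Int) × List String :=
  let lines := pvLines raw_input
  let lastL := PySem.List.pyGetD lines (-1) []          -- lines[-1] (Pre_ : lines ≠ [])
  let operand_cols := (PySem.List.enumerate lastL).filter (fun p => pvIsOp p.2)
  let operands := operand_cols.map (fun p => String.ofList [p.2])
  let body := PySem.List.slice lines none (some (-1))   -- lines[:-1]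
  let numbers := (PySem.List.pyRange 0 (operand_cols.length : Int) 1).foldl
    (fun acc i =>
      let start_idx := (PySem.List.pyGetD operand_cols i ((0 : Int), ' ')).1
      let end_idx := if i + 1 < (operand_cols.length : Int)
        then (PySem.List.pyGetD operand_cols (i + 1) ((0 : Int), ' ')).1
        else ((PySem.List.pyGetD lines 0 []).length : Int)   -- len(lines[0])
      acc ++ [pvHarvest body start_idx end_idx]) []
  (numbers, operands)

-- ===== PORT B =====
-- B's inner 'if group is not None and col < width: …' contribution of one column
def pvContrib (body : List (List Char)) (width col : Int) (g : List Int) : List Int :=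
  if col < width then
    let s := pvColNum body col
    if s.isEmpty then g else g ++ [(PySem.Int.ofChars? s).getD 0]
  else g

-- loop body of B's single forward scan (state: numbers, operands, optional current group)
def pvStepF (lastL : List Char) (body : List (List Char)) (width : Int)
    (st : List (List Int) × List String × Option (List Int)) (col : Int) :
    List (List Int) × List String × Option (List Int) :=
  let ch := PySem.List.pyGetD lastL col ' '
  let st' := if col < (lastL.length : Int) ∧ pvIsOp ch = true then
      (st.1 ++ st.2.2.toList, st.2.1 ++ [String.ofList [ch]], some ([] : List Int))
    else st
  match st'.2.2 with
  | some g => (st'.1, st'.2.1, some (pvContrib body width col g))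
  | none => st'

def parse_input_part2_alt (raw_input : String) : List (List Int) × List String :=
  let lines := pvLines raw_input
  let lastL := PySem.List.pyGetD lines (-1) []          -- lines[-1]
  let body := PySem.List.slice lines none (some (-1))   -- lines[:-1]
  let width : Int := ((PySem.List.pyGetD lines 0 []).length : Int)    -- len(lines[0])
  let st := (PySem.List.pyRange 0 (max (lastL.length : Int) width) 1).foldl
    (pvStepF lastL body width) ([], [], none)
  (st.1 ++ st.2.2.toList, st.2.1)                       -- final 'if group is not None' flush

-- ===== PRECONDITION & SPEC =====
-- helpers for the precondition (shared, not the ports)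
def pvOps (xs : List Char) : List (Int × Char) :=
  (PySem.List.enumerate xs).filter (fun p => pvIsOp p.2)

-- a column A scans is fine: in range for every body line (and hence left of len(lines[0]),
-- which is itself a body line whenever the body is non-empty) and int()-parsable if non-blank
def pvColOk (body : List (List Char)) (width col : Int) : Bool :=
  decide (col < width) &&
  body.all (fun line => decide (PySem.Raise.InRange line.length col)) &&
  (pvColNum body col == [] || (PySem.Int.ofChars? (pvColNum body col)).isSome)

-- Pre_ excludes exactly the inputs where Python A raises: an input whose stripped text has no
-- lines (IndexError on lines[-1]), and grids where some scanned column (between consecutive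
-- operators, or from the last operator to len(lines[0])) overruns a body line (IndexError) or
-- holds a non-empty vertical string that is not a valid int literal (ValueError).
def Pre_parse_input_part2 (raw_input : String) : Prop :=
  pvLines raw_input ≠ [] ∧
  List.IsChain (fun p q => ∀ col ∈ PySem.List.pyRange p.1 q.1 1,
      pvColOk (PySem.List.slice (pvLines raw_input) none (some (-1)))
        ((PySem.List.pyGetD (pvLines raw_input) 0 []).length : Int) col = true)
    (pvOps (PySem.List.pyGetD (pvLines raw_input) (-1) [])) ∧
  ∀ p ∈ (pvOps (PySem.List.pyGetD (pvLines raw_input) (-1) [])).getLast?.toList,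
    ∀ col ∈ PySem.List.pyRange p.1 ((PySem.List.pyGetD (pvLines raw_input) 0 []).length : Int) 1,
      pvColOk (PySem.List.slice (pvLines raw_input) none (some (-1)))
        ((PySem.List.pyGetD (pvLines raw_input) 0 []).length : Int) col = true
instance (raw_input : String) : Decidable (Pre_parse_input_part2 raw_input) := by
  unfold Pre_parse_input_part2; infer_instance

def pvWitness_parse_input_part2 : String := "12 34\n+  *"

def Spec_parse_input_part2 (raw_input : String) (out : List (List Int) × List String) : Prop :=
  out = parse_input_part2_alt raw_input
instance (raw_input : String) (out : List (List Int) × List String) :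
    Decidable (Spec_parse_input_part2 raw_input out) := by
  unfold Spec_parse_input_part2; infer_instance

-- ===== CLAIM (what is proved, stated in full; the proofs are below) =====
def Claim_equal_parse_input_part2 : Prop := ∀ (raw_input : String), Dom_parse_input_part2 raw_input → Pre_parse_input_part2 raw_input → Spec_parse_input_part2 raw_input (parse_input_part2 raw_input)

-- ===== LEMMAS AND PROOFS =====

-- one column's contribution, as a list ([] or a singleton)
def pvCellA (body : List (List Char)) (col : Int) : List Int :=
  if (pvColNum body col).isEmpty then [] else [(PySem.Int.ofChars? (pvColNum body col)).getD 0]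

def pvCellF (body : List (List Char)) (width col : Int) : List Int :=
  if col < width then pvCellA body col else []

-- the groups A builds, described by the operator list: each operator owns [its col, next op col),
-- the last one [its col, b)
def pvGroups (body : List (List Char)) : List (Int × Char) → Int → List (List Int)
  | [], _ => []
  | [(i, _)], b => [pvHarvest body i b]
  | (i, _) :: (j, d) :: rest, b => pvHarvest body i j :: pvGroups body ((j, d) :: rest) b

-- the state B's scan maintains: closed groups, and the open group (none before the first op)
def pvNumsB (body : List (List Char)) (width : Int) :
    List (Int × Char) → Int → List (List Int) × Option (List Int)
  | [], _ => ([], none)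
  | [(i, _)], b => ([], some ((PySem.List.pyRange i b 1).flatMap (pvCellF body width)))
  | (i, _) :: (j, d) :: rest, b =>
      let r := pvNumsB body width ((j, d) :: rest) b
      ((PySem.List.pyRange i j 1).flatMap (pvCellF body width) :: r.1, r.2)

def pvFlush (p : List (List Int) × Option (List Int)) : List (List Int) := p.1 ++ p.2.toList

theorem pvContrib_eq (body : List (List Char)) (width col : Int) (g : List Int) :
    pvContrib body width col g = g ++ pvCellF body width col := by
  unfold pvContrib pvCellF pvCellA
  split_ifs <;> simp_all

theorem pvHarvest_flat (body : List (List Char)) (a b : Int) :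
    pvHarvest body a b = (PySem.List.pyRange a b 1).flatMap (pvCellA body) := by
  unfold pvHarvest
  have h1 : ∀ (acc : List Int) (col : Int), col ∈ PySem.List.pyRange a b 1 →
      (let s := pvColNum body col;
        if s.isEmpty then acc else acc ++ [(PySem.Int.ofChars? s).getD 0]) =
      acc ++ pvCellA body col := by
    intro acc col _
    simp only [pvCellA]
    split_ifs <;> simp
  exact Eq.trans (PySem.List.foldl_congr_mem _ _ _ _ h1)
    (by rw [PySem.List.foldl_append_eq_flatMap, List.nil_append])

theorem mem_pvOps (xs : List Char) (p : Int × Char) (h : p ∈ pvOps xs) :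
    0 ≤ p.1 ∧ p.1 < (xs.length : Int) := by
  unfold pvOps at h
  have := List.mem_filter.mp h |>.1
  rw [PySem.List.mem_enumerate_iff] at this
  obtain ⟨k, hk, rfl⟩ := this
  constructor <;> simp <;> omega

theorem pvOps_append (xs : List Char) (x : Char) :
    pvOps (xs ++ [x]) = pvOps xs ++ (if pvIsOp x then [((xs.length : Int), x)] else []) := by
  unfold pvOps
  rw [PySem.List.enumerate_append, List.filter_append]
  simp [PySem.List.enumerate]
  split_ifs with h <;> simp [h]

theorem pvOps_take_succ (xs : List Char) (n : Nat) (h : n < xs.length) :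
    pvOps (xs.take (n + 1)) =
      pvOps (xs.take n) ++ (if pvIsOp xs[n] then [((n : Int), xs[n])] else []) := by
  rw [List.take_succ, List.getElem?_eq_getElem h]
  have hlen : (xs.take n).length = n := by simp [List.length_take]; omega
  have := pvOps_append (xs.take n) xs[n]
  rw [hlen] at this
  simpa using this

theorem pvNumsB_append (body : List (List Char)) (width : Int) (L : List (Int × Char))
    (i : Int) (c : Char) (b : Int) :
    pvNumsB body width (L ++ [(i, c)]) b =
      (pvFlush (pvNumsB body width L i),
       some ((PySem.List.pyRange i b 1).flatMap (pvCellF body width))) := by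
  induction L with
  | nil => simp [pvNumsB, pvFlush]
  | cons p L ih =>
    obtain ⟨j, d⟩ := p
    cases L with
    | nil => simp [pvNumsB, pvFlush]
    | cons q L' =>
      obtain ⟨k, e⟩ := q
      simp only [List.cons_append, pvNumsB] at *
      rw [ih]
      simp [pvFlush]

theorem pvNumsB_succ (body : List (List Char)) (width : Int) (n : Int) (L : List (Int × Char))
    (hL : ∀ p ∈ L, p.1 ≤ n) :
    pvNumsB body width L (n + 1) =
      ((pvNumsB body width L n).1,
       (pvNumsB body width L n).2.map (fun g => g ++ pvCellF body width n)) := by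
  induction L with
  | nil => simp [pvNumsB]
  | cons p L ih =>
    obtain ⟨i, c⟩ := p
    cases L with
    | nil =>
      have hi : i ≤ n := hL (i, c) (by simp)
      simp only [pvNumsB, Option.map_some]
      rw [PySem.List.pyRange_one_succ_right hi, List.flatMap_append]
      simp
    | cons q L' =>
      have hq : ∀ p ∈ q :: L', p.1 ≤ n := fun p hp => hL p (List.mem_cons_of_mem _ hp)
      obtain ⟨j, d⟩ := q
      simp only [pvNumsB]
      rw [ih hq]

-- the invariant of B's scan: after the first n columns, the state is exactly the groups of
-- the operators among the first n columns, the open group bounded by n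
theorem pvFoldInv (lastL : List Char) (body : List (List Char)) (width : Int) (n : Nat) :
    (PySem.List.pyRange 0 (n : Int) 1).foldl (pvStepF lastL body width) ([], [], none) =
      ((pvNumsB body width (pvOps (lastL.take n)) (n : Int)).1,
       (pvOps (lastL.take n)).map (fun p => String.ofList [p.2]),
       (pvNumsB body width (pvOps (lastL.take n)) (n : Int)).2) := by
  induction n with
  | zero => simp [PySem.List.pyRange_one_eq_nil, pvOps, PySem.List.enumerate, pvNumsB]
  | succ n ih =>
    have hcast : ((n + 1 : Nat) : Int) = (n : Int) + 1 := by push_cast; ring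
    rw [hcast, PySem.List.pyRange_one_succ_right (by positivity), List.foldl_append,
        List.foldl_cons, List.foldl_nil, ih]
    by_cases hcond : (n : Int) < (lastL.length : Int) ∧
        pvIsOp (PySem.List.pyGetD lastL (n : Int) ' ') = true
    · -- column n is an operator: flush, open a new group, then contribute column n to it
      have hlt : n < lastL.length := by exact_mod_cast hcond.1
      have hget : PySem.List.pyGetD lastL (n : Int) ' ' = lastL[n] := by
        rw [PySem.List.pyGetD_natCast]; exact List.getD_eq_getElem _ _ hlt
      have hop : pvIsOp lastL[n] = true := by rw [← hget]; exact hcond.2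
      rw [pvOps_take_succ lastL n hlt, if_pos hop, pvNumsB_append]
      unfold pvStepF
      simp only []
      rw [if_pos hcond]
      simp only [hget, List.map_append, List.map_cons, List.map_nil]
      rw [pvContrib_eq]
      rw [PySem.List.pyRange_one_succ_right (le_refl (n : Int)),
          PySem.List.pyRange_one_eq_nil (le_refl (n : Int))]
      simp [pvFlush]
    · -- column n is not an operator: the open group (if any) absorbs column n
      have hops : pvOps (lastL.take (n + 1)) = pvOps (lastL.take n) := by
        by_cases hlt : n < lastL.length
        · have hget : PySem.List.pyGetD lastL (n : Int) ' ' = lastL[n] := by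
            rw [PySem.List.pyGetD_natCast]; exact List.getD_eq_getElem _ _ hlt
          have hop : ¬ pvIsOp lastL[n] = true := by
            intro hc
            exact hcond ⟨by exact_mod_cast hlt, by rw [hget]; exact hc⟩
          rw [pvOps_take_succ lastL n hlt, if_neg hop, List.append_nil]
        · rw [List.take_succ, List.getElem?_eq_none (by omega), Option.toList_none,
              List.append_nil]
      have hbound : ∀ p ∈ pvOps (lastL.take n), p.1 ≤ (n : Int) := by
        intro p hp
        have := (mem_pvOps _ p hp).2
        have hlen : (lastL.take n).length ≤ n := by simp [List.length_take]
        have : ((lastL.take n).length : Int) ≤ (n : Int) := by exact_mod_cast hlen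
        omega
      rw [hops, pvNumsB_succ body width (n : Int) _ hbound]
      unfold pvStepF
      simp only []
      rw [if_neg hcond]
      cases hg : (pvNumsB body width (pvOps (lastL.take n)) (n : Int)).2 with
      | none => simp
      | some g => simp [pvContrib_eq]

-- the tail of the last group: scanning on to M ≥ width with the width test is scanning to width
theorem pvTail (body : List (List Char)) (width M i : Int) (hwM : width ≤ M) :
    (PySem.List.pyRange i M 1).flatMap (pvCellF body width) =
      (PySem.List.pyRange i width 1).flatMap (pvCellA body) := by
  have hnil : ∀ a b : Int, width ≤ a →
      (PySem.List.pyRange a b 1).flatMap (pvCellF body width) = [] := by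
    intro a b ha
    apply List.flatMap_eq_nil_iff.mpr
    intro col hcol
    rw [PySem.List.mem_pyRange_one] at hcol
    unfold pvCellF
    rw [if_neg (by omega)]
  by_cases hi : i ≤ width
  · have hcg : (PySem.List.pyRange i width 1).flatMap (pvCellF body width) =
        (PySem.List.pyRange i width 1).flatMap (pvCellA body) := by
      apply List.flatMap_congr
      intro col hcol
      rw [PySem.List.mem_pyRange_one] at hcol
      unfold pvCellF
      rw [if_pos hcol.2]
    rw [PySem.List.pyRange_one_append i width M hi hwM, List.flatMap_append, hcg,
        hnil width M (le_refl width), List.append_nil]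
  · rw [hnil i M (by omega), PySem.List.pyRange_one_eq_nil (by omega : width ≤ i)]
    simp

-- under Pre_, A's groups (bounded by width) are B's flushed state (bounded by M ≥ width)
theorem pvBridge (body : List (List Char)) (width M : Int) (hwM : width ≤ M)
    (L : List (Int × Char))
    (hchain : List.IsChain (fun p q => ∀ col ∈ PySem.List.pyRange p.1 q.1 1,
        pvColOk body width col = true) L) :
    pvGroups body L width = pvFlush (pvNumsB body width L M) := by
  induction L with
  | nil => simp [pvGroups, pvNumsB, pvFlush]
  | cons p L ih =>
    obtain ⟨i, c⟩ := p
    cases L with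
    | nil =>
      simp only [pvGroups, pvNumsB, pvFlush, List.nil_append, Option.toList_some]
      rw [pvHarvest_flat, pvTail body width M i hwM]
    | cons q L' =>
      obtain ⟨j, d⟩ := q
      rw [List.isChain_cons_cons] at hchain
      have hcg : (PySem.List.pyRange i j 1).flatMap (pvCellA body) =
          (PySem.List.pyRange i j 1).flatMap (pvCellF body width) := by
        apply List.flatMap_congr
        intro col hcol
        have hok := hchain.1 col hcol
        unfold pvColOk at hok
        simp only [Bool.and_eq_true, decide_eq_true_eq] at hok
        unfold pvCellF
        rw [if_pos hok.1.1]
      simp only [pvGroups, pvNumsB, pvFlush, List.cons_append]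
      rw [ih hchain.2, pvHarvest_flat, hcg]
      rfl

theorem pvLength_pvGroups (body : List (List Char)) (L : List (Int × Char)) (b : Int) :
    (pvGroups body L b).length = L.length := by
  induction L with
  | nil => rfl
  | cons p L ih =>
    obtain ⟨j, d⟩ := p
    cases L with
    | nil => rfl
    | cons q L' =>
      obtain ⟨k, e⟩ := q
      simpa [pvGroups] using ih

theorem pvGroups_getElem (body : List (List Char)) (L : List (Int × Char)) (b : Int)
    (j : Nat) (hj : j < L.length) :
    (pvGroups body L b)[j]'(by rw [pvLength_pvGroups]; exact hj) =
      pvHarvest body (L[j]'hj).1 (if h : j + 1 < L.length then (L[j + 1]'h).1 else b) := by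
  induction L generalizing j with
  | nil => simp at hj
  | cons p L ih =>
    obtain ⟨i, c⟩ := p
    cases L with
    | nil =>
      simp only [List.length_cons, List.length_nil] at hj
      have hj0 : j = 0 := by omega
      subst hj0
      simp [pvGroups]
    | cons q L' =>
      obtain ⟨k, e⟩ := q
      cases j with
      | zero => simp [pvGroups]
      | succ m =>
        have hm : m < ((k, e) :: L').length := by simpa using Nat.lt_of_succ_lt_succ hj
        have := ih m hm
        simp only [pvGroups, List.getElem_cons_succ]
        rw [this]
        by_cases h : m + 1 < ((k, e) :: L').length
        · rw [dif_pos h, dif_pos (by simpa using Nat.succ_lt_succ h)]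
          simp
        · rw [dif_neg h, dif_neg (by intro hc; exact h (by simpa using Nat.lt_of_succ_lt_succ hc))]

-- A's indexed map over the operator list is exactly pvGroups
theorem pvMapA (body : List (List Char)) (L : List (Int × Char)) (b : Int) :
    (List.range L.length).map (fun j =>
        pvHarvest body (L.getD j ((0 : Int), ' ')).1
          (if ((j : Int) + 1) < (L.length : Int) then (L.getD (j + 1) ((0 : Int), ' ')).1 else b))
      = pvGroups body L b := by
  apply List.ext_getElem
  · simp [pvLength_pvGroups]
  · intro j h1 h2
    have hj : j < L.length := by simpa using h1
    rw [List.getElem_map, List.getElem_range, pvGroups_getElem body L b j hj]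
    by_cases h : j + 1 < L.length
    · rw [if_pos (by exact_mod_cast h), dif_pos h,
          List.getD_eq_getElem L _ hj, List.getD_eq_getElem L _ h]
    · rw [if_neg (by intro hc; exact h (by exact_mod_cast hc)), dif_neg h,
          List.getD_eq_getElem L _ hj]

-- ===== VERDICT (by name: the statement is the Claim_ definition above) =====
theorem parse_input_part2_spec : Claim_equal_parse_input_part2 := by
  intro raw _ hpre
  unfold Pre_parse_input_part2 at hpre
  obtain ⟨hne, hchain, hlastPre⟩ := hpre
  unfold Spec_parse_input_part2 parse_input_part2 parse_input_part2_alt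
  simp only []
  generalize hgen : pvLines raw = lines at *
  have hM : max ((PySem.List.pyGetD lines (-1) []).length : Int)
      ((PySem.List.pyGetD lines 0 []).length : Int) =
      ((max (PySem.List.pyGetD lines (-1) []).length
        (PySem.List.pyGetD lines 0 []).length : Nat) : Int) := by
    push_cast
    rfl
  rw [hM, pvFoldInv, List.take_of_length_le (Nat.le_max_left _ _)]
  refine Prod.ext ?_ ?_
  · -- numbers component: A's indexed pass = pvGroups = B's flushed scan state
    simp only []
    have hbr := pvBridge (PySem.List.slice lines none (some (-1)))
      ((PySem.List.pyGetD lines 0 []).length : Int)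
      (((max (PySem.List.pyGetD lines (-1) []).length
          (PySem.List.pyGetD lines 0 []).length : Nat)) : Int)
      (by rw [← hM]; exact le_max_right _ _)
      (pvOps (PySem.List.pyGetD lines (-1) [])) hchain
    unfold pvFlush at hbr
    rw [← hbr]
    rw [← pvMapA (PySem.List.slice lines none (some (-1)))
         (pvOps (PySem.List.pyGetD lines (-1) []))
         ((PySem.List.pyGetD lines 0 []).length : Int)]
    rw [PySem.List.pyRange_one]
    rw [List.foldl_map, PySem.List.foldl_append_singleton_eq_map]
    simp [PySem.List.pyGetD_natCast]
    apply List.map_congr_left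
    intro a ha
    rw [show ((a : Int) + 1) = ((a + 1 : Nat) : Int) from by push_cast; ring,
        PySem.List.pyGetD_natCast]
    simp only [List.getD_eq_getElem?_getD]
    rfl
  · -- operands component
    simp [pvOps]
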